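-- pv_equiv track=rewrite | github.com/hirmeos/entity-fishing-client-python | entity-fishing_client/nerd.py | _group_sentences
-- ===== SOURCE A (Python) =====
-- def _group_sentences(total_nb_sentences, group_length):
--     """ Split sentences in groups, given a specific group length.
--
--     Args:
--         total_nb_sentences (int): Total available sentences.
--         group_length (int): Limit of length for each group.
--
--     Returns:
--         list: Contains groups (lists) of sentences.
--     """
--     sentences_groups = []
--     current_sentence_group = []
--
--     for i in range(0, total_nb_sentences):
--         if i % group_length == 0:
--             if len(current_sentence_group) > 0:
--                 sentences_groups.append(current_sentence_group)
--             current_sentence_group = [i]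
--         else:
--             current_sentence_group.append(i)
--
--     if len(current_sentence_group) > 0:
--         sentences_groups.append(current_sentence_group)
--
--     return sentences_groups
-- ===== SOURCE B (Python) =====
-- def _group_sentences(total_nb_sentences, group_length):
--     """ Split sentences in groups, given a specific group length. """
--     return [list(range(start, min(start + group_length, total_nb_sentences)))
--             for start in range(0, total_nb_sentences, group_length)]
-- ===== Notes on version B (the rewrite author's own statement) =====
-- stated objective: simpler
-- what changed: Replaces the per-index modulo scan with accumulator/flush bookkeeping by a stride-based traversal: one range over the group starts, each group produced directly as a slice range(start, min(start+group_length, n)).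
-- outside the precondition, e.g. on _group_sentences(5, -2): A returns [[0, 1], [2, 3], [4]], B returns []; on _group_sentences(0, 0): A returns [], B raises ValueError
import Mathlib
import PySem

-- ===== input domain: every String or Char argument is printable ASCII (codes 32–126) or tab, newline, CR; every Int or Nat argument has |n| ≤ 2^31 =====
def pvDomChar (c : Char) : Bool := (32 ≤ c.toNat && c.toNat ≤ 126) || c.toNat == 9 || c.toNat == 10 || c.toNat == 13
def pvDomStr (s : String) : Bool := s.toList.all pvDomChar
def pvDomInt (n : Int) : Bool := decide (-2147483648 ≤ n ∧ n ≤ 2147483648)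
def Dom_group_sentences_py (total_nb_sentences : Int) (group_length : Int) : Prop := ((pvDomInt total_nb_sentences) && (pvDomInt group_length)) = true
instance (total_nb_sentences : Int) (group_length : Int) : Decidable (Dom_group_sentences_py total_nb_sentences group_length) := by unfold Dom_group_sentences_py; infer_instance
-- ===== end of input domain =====

-- B replaces A's per-index modulo scan (with accumulator/flush bookkeeping) by a
-- stride-based traversal over the group starts, building each group directly; objective: simpler.

-- ===== PORT A =====
-- one loop step of A: the body of `for i in range(0, total_nb_sentences)`
def gsStep (g : Int) (st : List (List Int) × List Int) (i : Int) : List (List Int) × List Int :=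
  if PySem.Int.mod i g = 0 then
    ((if st.2.length > 0 then st.1 ++ [st.2] else st.1), [i])
  else
    (st.1, st.2 ++ [i])

-- A's trailing `if len(current_sentence_group) > 0: sentences_groups.append(...)`
def gsFinish (st : List (List Int) × List Int) : List (List Int) :=
  if st.2.length > 0 then st.1 ++ [st.2] else st.1

def group_sentences_py (total_nb_sentences : Int) (group_length : Int) : List (List Int) :=
  gsFinish ((PySem.List.pyRange 0 total_nb_sentences 1).foldl (gsStep group_length) ([], []))

-- ===== PORT B =====
def group_sentences_py_alt (total_nb_sentences : Int) (group_length : Int) : List (List Int) :=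
  (PySem.List.pyRange 0 total_nb_sentences group_length).map
    (fun start => PySem.List.pyRange start (min (start + group_length) total_nb_sentences) 1)

-- ===== PRECONDITION & SPEC =====
-- Pre_ excludes group_length ≤ 0: there A either raises ZeroDivisionError (group_length = 0
-- with total_nb_sentences > 0) or returns accidental values of its modulo bookkeeping
-- (negative group_length chunks by |group_length|; group_length = 0 with n ≤ 0 returns []),
-- while B's stride-based range raises ValueError for step 0 and yields [] for a negative step.
def Pre_group_sentences_py (total_nb_sentences : Int) (group_length : Int) : Prop :=
  0 < group_length
instance (total_nb_sentences : Int) (group_length : Int) : Decidable (Pre_group_sentences_py total_nb_sentences group_length) := by unfold Pre_group_sentences_py; infer_instance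

def pvWitness_group_sentences_py : Int × Int := (5, 2)

def Spec_group_sentences_py (total_nb_sentences : Int) (group_length : Int) (out : List (List Int)) : Prop := out = group_sentences_py_alt total_nb_sentences group_length
instance (total_nb_sentences : Int) (group_length : Int) (out : List (List Int)) : Decidable (Spec_group_sentences_py total_nb_sentences group_length out) := by unfold Spec_group_sentences_py; infer_instance

-- ===== CLAIM (what is proved, stated in full; the proofs are below) =====
def Claim_equal_group_sentences_py : Prop := ∀ (total_nb_sentences : Int) (group_length : Int), Dom_group_sentences_py total_nb_sentences group_length → Pre_group_sentences_py total_nb_sentences group_length → Spec_group_sentences_py total_nb_sentences group_length (group_sentences_py total_nb_sentences group_length)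

-- ===== LEMMAS AND PROOFS =====

-- cons form of pyRange for a positive step
lemma pyRange_pos_cons (a b g : Int) (hg : 0 < g) (hab : a < b) :
    PySem.List.pyRange a b g = a :: PySem.List.pyRange (a + g) b g := by
  rw [PySem.List.pyRange_of_pos a b hg, PySem.List.pyRange_of_pos (a + g) b hg]
  by_cases h : a + g < b
  · have h1 : (b - a - 1 + 1 * g) / g = (b - a - 1) / g + 1 :=
      Int.add_mul_ediv_right _ _ hg.ne'
    have h2 : b - a + g - 1 = b - a - 1 + 1 * g := by ring
    have h3 : ((b - a + g - 1) / g).toNat = ((b - (a + g) + g - 1) / g).toNat + 1 := by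
      rw [h2, h1]
      have hnn : 0 ≤ (b - a - 1) / g := by
        apply Int.ediv_nonneg (by omega) hg.le
      have : b - (a + g) + g - 1 = b - a - 1 := by ring
      rw [this]; omega
    simp only [if_pos hab, if_pos h, h3, List.range_succ_eq_map, List.map_cons, List.map_map]
    congr 1
    · simp
    · apply List.map_congr_left
      intro k _
      simp only [Function.comp]
      push_cast
      ring
  · -- b ≤ a + g : the range is the single element [a]
    have hx : 0 ≤ b - a - 1 := by omega
    have hlt : b - a - 1 < g := by omega
    have h0 : (b - a - 1) / g = 0 := Int.ediv_eq_zero_of_lt hx hlt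
    have h2 : b - a + g - 1 = b - a - 1 + 1 * g := by ring
    have h1 : (b - a - 1 + 1 * g) / g = (b - a - 1) / g + 1 :=
      Int.add_mul_ediv_right _ _ hg.ne'
    have hN : ((b - a + g - 1) / g).toNat = 1 := by rw [h2, h1, h0]; rfl
    simp only [if_pos hab, if_neg h, hN]
    simp

-- folding A's step over indices that are not multiples of g only extends the current group
lemma foldl_nonmult (g : Int) (l : List Int) :
    ∀ (G : List (List Int)) (cur : List Int),
      (∀ i ∈ l, PySem.Int.mod i g ≠ 0) →
      l.foldl (gsStep g) (G, cur) = (G, cur ++ l) := by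
  induction l with
  | nil => intro G cur _; simp
  | cons i tl ih =>
    intro G cur h
    have hi : PySem.Int.mod i g ≠ 0 := h i (List.mem_cons_self)
    simp only [List.foldl_cons, gsStep, if_neg hi]
    rw [ih G (cur ++ [i]) (fun j hj => h j (List.mem_cons_of_mem _ hj))]
    simp

-- main invariant: starting at a multiple `a` of g with an empty current group,
-- A's fold followed by the final flush produces exactly B's chunks from `a`.
lemma gs_main (g : Int) (hg : 0 < g) :
    ∀ (k : Nat) (a n : Int), (n - a).toNat ≤ k → g ∣ a → ∀ (G : List (List Int)),
      gsFinish ((PySem.List.pyRange a n 1).foldl (gsStep g) (G, [])) =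
        G ++ (PySem.List.pyRange a n g).map
          (fun s => PySem.List.pyRange s (min (s + g) n) 1) := by
  intro k
  induction k with
  | zero =>
    intro a n hk _ G
    have hna : n ≤ a := by omega
    rw [PySem.List.pyRange_one_eq_nil hna, PySem.List.pyRange_of_pos a n hg,
      if_neg (by omega)]
    simp [gsFinish]
  | succ k ih =>
    intro a n hk ha G
    by_cases hna : n ≤ a
    · rw [PySem.List.pyRange_one_eq_nil hna, PySem.List.pyRange_of_pos a n hg,
        if_neg (by omega)]
      simp [gsFinish]
    · have han : a < n := by omega
      set b := min (a + g) n with hb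
      have hab : a < b := by omega
      have hbn : b ≤ n := by omega
      -- split the index range at b
      rw [PySem.List.pyRange_one_append a b n (by omega) hbn, List.foldl_append]
      -- the fold over [a, b) turns ([], …) into the current block
      have hmoda : PySem.Int.mod a g = 0 := (PySem.Int.mod_eq_zero_iff_dvd a g).mpr ha
      have hblock : (PySem.List.pyRange a b 1).foldl (gsStep g) (G, []) =
          (G, PySem.List.pyRange a b 1) := by
        rw [PySem.List.pyRange_one_cons hab]
        simp only [List.foldl_cons, gsStep, if_pos hmoda, List.length_nil]
        rw [if_neg (by omega)]
        rw [foldl_nonmult g _ G [a] ?_]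
        · rw [List.singleton_append, ← PySem.List.pyRange_one_cons hab]
        · intro i hi
          have hmem := (PySem.List.mem_pyRange_one).mp hi
          intro hc
          have hdvd : g ∣ i := (PySem.Int.mod_eq_zero_iff_dvd i g).mp hc
          have : g ∣ i - a := dvd_sub hdvd ha
          have hpos : 0 < i - a := by omega
          have := Int.le_of_dvd hpos this
          omega
      rw [hblock]
      by_cases hcase : n ≤ a + g
      · -- last (possibly partial) block : b = n
        have hbn' : b = n := by omega
        rw [hbn', PySem.List.pyRange_one_eq_nil (le_refl n)]
        simp only [List.foldl_nil]
        have hne : PySem.List.pyRange a n 1 ≠ [] := by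
          rw [PySem.List.pyRange_one_cons han]; simp
        have hlen : 0 < (PySem.List.pyRange a n 1).length := List.length_pos_iff.mpr hne
        have htail : PySem.List.pyRange (a + g) n g = [] := by
          rw [PySem.List.pyRange_of_pos (a + g) n hg, if_neg (by omega)]
          simp
        rw [pyRange_pos_cons a n g hg han, htail]
        simp only [gsFinish]
        rw [if_pos (by exact_mod_cast hlen)]
        simp [min_eq_right (by omega : n ≤ a + g)]
      · -- full block: b = a + g, recurse from b
        have hbg : b = a + g := by omega
        have hbn2 : b < n := by omega
        have hmodb : PySem.Int.mod b g = 0 := by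
          rw [hbg]; exact (PySem.Int.mod_eq_zero_iff_dvd _ g).mpr (by
            exact dvd_add ha dvd_rfl)
        have hblkne : PySem.List.pyRange a b 1 ≠ [] := by
          rw [PySem.List.pyRange_one_cons hab]; simp
        have hblklen : 0 < (PySem.List.pyRange a b 1).length := List.length_pos_iff.mpr hblkne
        -- the step at b flushes the block and starts a new group [b]
        have hflush : (PySem.List.pyRange b n 1).foldl (gsStep g) (G, PySem.List.pyRange a b 1)
            = (PySem.List.pyRange b n 1).foldl (gsStep g) (G ++ [PySem.List.pyRange a b 1], []) := by
          rw [PySem.List.pyRange_one_cons hbn2]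
          simp only [List.foldl_cons, gsStep, if_pos hmodb, List.length_nil]
          rw [if_pos (by exact_mod_cast hblklen), if_neg (by omega)]
        rw [hflush]
        rw [ih b n (by omega) (hbg ▸ dvd_add ha dvd_rfl) (G ++ [PySem.List.pyRange a b 1])]
        rw [pyRange_pos_cons a n g hg han, List.map_cons, ← hbg]
        simp [min_eq_left hbn]

-- ===== VERDICT (by name: the statement is the Claim_ definition above) =====
theorem group_sentences_py_spec : Claim_equal_group_sentences_py := by
  intro n g _ hpre
  unfold Spec_group_sentences_py group_sentences_py group_sentences_py_alt
  have := gs_main g hpre ((n - 0).toNat) 0 n (le_refl _) (dvd_zero g) []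
  simpa using this
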